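-- pv_equiv track=rewrite | github.com/jcarrasquel/hse-uamc-conformance-checking | models/aist/model_aist_A_deviation_control_flow.py | buyPriorityRule
-- ===== SOURCE A (Python) =====
-- def buyPriorityRule(buyOrder, orderBookBuySide):
--
-- 	# This function returns true if buyOrder is the highest ranked order in the buy side of the order book, false otherwise
-- 	orderPrice = buyOrder[2]
-- 	orderArrivalTime = buyOrder[1]
-- 	orderIdentifier = buyOrder[0]
--
-- 	ishighestRankedBuyOrder = True # "He is innocent, till we demonstrate the opposite" For now, we believe he is the highest ranked order
--
-- 	for i in range(len(orderBookBuySide)):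
-- 		nextBuyOrder = orderBookBuySide[i]
-- 		if nextBuyOrder[0] != orderIdentifier: # check that we are not checking the same order
-- 			if not( (orderPrice > nextBuyOrder[2]) or (orderPrice == nextBuyOrder[2] and orderArrivalTime <= nextBuyOrder[1])):
-- 				# Priority rule, violated
-- 				ishighestRankedBuyOrder = False
-- 				break
--
-- 	return ishighestRankedBuyOrder == True
-- ===== SOURCE B (Python) =====
-- def buyPriorityRule(buyOrder, orderBookBuySide):
--     oid, t, p = buyOrder[0], buyOrder[1], buyOrder[2]
--     best = None
--     for x in orderBookBuySide:
--         if x[0] == oid: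
--             continue
--         if best is None or x[2] > best[2] or (x[2] == best[2] and x[1] < best[1]):
--             best = x
--     if best is None:
--         return True
--     return p > best[2] or (p == best[2] and t <= best[1])
-- ===== Notes on version B (the rewrite author's own statement) =====
-- stated objective: alternative
-- what changed: B reduces the book (minus entries with buyOrder's id) to a single best rival order under the price/then-earliest-time relation and makes one final comparison, instead of A's per-element violation test with early break.
import Mathlib
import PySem

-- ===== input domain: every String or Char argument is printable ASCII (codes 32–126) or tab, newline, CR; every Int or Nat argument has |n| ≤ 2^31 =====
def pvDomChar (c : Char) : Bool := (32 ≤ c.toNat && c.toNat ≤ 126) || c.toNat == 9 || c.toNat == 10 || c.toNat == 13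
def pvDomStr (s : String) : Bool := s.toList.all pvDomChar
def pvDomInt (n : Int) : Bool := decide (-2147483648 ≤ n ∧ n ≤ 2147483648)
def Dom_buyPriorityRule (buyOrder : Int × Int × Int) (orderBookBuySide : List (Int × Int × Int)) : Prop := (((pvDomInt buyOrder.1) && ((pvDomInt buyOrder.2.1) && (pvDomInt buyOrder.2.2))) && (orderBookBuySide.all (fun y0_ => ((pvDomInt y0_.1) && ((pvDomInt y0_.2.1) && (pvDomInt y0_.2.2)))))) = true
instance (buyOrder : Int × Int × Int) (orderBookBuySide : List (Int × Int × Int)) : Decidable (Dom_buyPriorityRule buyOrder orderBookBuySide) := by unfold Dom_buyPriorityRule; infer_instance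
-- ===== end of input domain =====

-- B replaces A's per-element violation test + early break by a fold to the single best rival order followed by one comparison (objective: alternative; return value only).
-- ===== PORT A =====
-- A: per-element violation check with early break
def buyA_loop (oid t p : Int) : List (Int × Int × Int) → Bool
  | [] => true
  | x :: rest =>
    if x.1 ≠ oid then
      if !(decide (p > x.2.2) || (decide (p = x.2.2) && decide (t ≤ x.2.1))) then
        false  -- break with flag set to False
      else buyA_loop oid t p rest
    else buyA_loop oid t p rest

def buyPriorityRule (buyOrder : Int × Int × Int) (orderBookBuySide : List (Int × Int × Int)) : Bool :=
  buyA_loop buyOrder.1 buyOrder.2.1 buyOrder.2.2 orderBookBuySide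

-- ===== PORT B =====
-- B: fold to the single best rival order, then one final comparison
def buyB_best (oid : Int) : Option (Int × Int × Int) → List (Int × Int × Int) → Option (Int × Int × Int)
  | best, [] => best
  | best, x :: rest =>
    if x.1 = oid then buyB_best oid best rest
    else
      match best with
      | none => buyB_best oid (some x) rest
      | some b =>
        if decide (x.2.2 > b.2.2) || (decide (x.2.2 = b.2.2) && decide (x.2.1 < b.2.1)) then
          buyB_best oid (some x) rest
        else buyB_best oid (some b) rest

def buyPriorityRule_alt (buyOrder : Int × Int × Int) (orderBookBuySide : List (Int × Int × Int)) : Bool :=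
  match buyB_best buyOrder.1 none orderBookBuySide with
  | none => true
  | some b => decide (buyOrder.2.2 > b.2.2) || (decide (buyOrder.2.2 = b.2.2) && decide (buyOrder.2.1 ≤ b.2.1))

-- ===== PRECONDITION & SPEC =====
def Spec_buyPriorityRule (buyOrder : Int × Int × Int) (orderBookBuySide : List (Int × Int × Int)) (out : Bool) : Prop := out = buyPriorityRule_alt buyOrder orderBookBuySide
instance (buyOrder : Int × Int × Int) (orderBookBuySide : List (Int × Int × Int)) (out : Bool) : Decidable (Spec_buyPriorityRule buyOrder orderBookBuySide out) := by unfold Spec_buyPriorityRule; infer_instance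

-- ===== CLAIM (what is proved, stated in full; the proofs are below) =====
def Claim_equal_buyPriorityRule : Prop := ∀ (buyOrder : Int × Int × Int) (orderBookBuySide : List (Int × Int × Int)), Dom_buyPriorityRule buyOrder orderBookBuySide → Spec_buyPriorityRule buyOrder orderBookBuySide (buyPriorityRule buyOrder orderBookBuySide)

-- ===== LEMMAS AND PROOFS =====

-- ===== VERDICT (by name: the statement is the Claim_ definition above) =====
-- buy beats-or-ties x
def G (t p : Int) (x : Int × Int × Int) : Bool :=
  decide (p > x.2.2) || (decide (p = x.2.2) && decide (t ≤ x.2.1))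

def checkOpt (t p : Int) : Option (Int × Int × Int) → Bool
  | none => true
  | some b => G t p b

theorem buyA_loop_all (oid t p : Int) (xs : List (Int × Int × Int)) :
    buyA_loop oid t p xs = xs.all (fun x => decide (x.1 = oid) || G t p x) := by
  induction xs with
  | nil => rfl
  | cons x rest ih =>
    by_cases h1 : x.1 = oid
    · simp [buyA_loop, h1, ih]
    · by_cases h2 : (decide (p > x.2.2) || (decide (p = x.2.2) && decide (t ≤ x.2.1))) = true
      · simp [buyA_loop, h1, h2, ih, G]
      · simp only [Bool.not_eq_true] at h2
        simp [buyA_loop, h1, h2, G]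

theorem G_trans_better (t p : Int) (x b : Int × Int × Int)
    (h2 : (decide (x.2.2 > b.2.2) || (decide (x.2.2 = b.2.2) && decide (x.2.1 < b.2.1))) = true)
    (hx : G t p x = true) : G t p b = true := by
  simp only [G, Bool.or_eq_true, Bool.and_eq_true, decide_eq_true_eq] at *
  omega

theorem G_trans_worse (t p : Int) (x b : Int × Int × Int)
    (h2 : ¬ (decide (x.2.2 > b.2.2) || (decide (x.2.2 = b.2.2) && decide (x.2.1 < b.2.1))) = true)
    (hb : G t p b = true) : G t p x = true := by
  simp only [G, Bool.or_eq_true, Bool.and_eq_true, decide_eq_true_eq, not_or, not_and, not_lt] at *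
  omega

theorem buyB_best_check (oid t p : Int) (xs : List (Int × Int × Int))
    (acc : Option (Int × Int × Int)) :
    checkOpt t p (buyB_best oid acc xs)
      = (checkOpt t p acc && xs.all (fun x => decide (x.1 = oid) || G t p x)) := by
  induction xs generalizing acc with
  | nil => simp [buyB_best]
  | cons x rest ih =>
    by_cases h1 : x.1 = oid
    · rw [show buyB_best oid acc (x :: rest) = buyB_best oid acc rest by
        cases acc <;> simp [buyB_best, h1]]
      rw [ih]
      simp [h1]
    · cases acc with
      | none =>
        rw [show buyB_best oid none (x :: rest) = buyB_best oid (some x) rest by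
          simp [buyB_best, h1]]
        rw [ih]
        simp [checkOpt, h1]
      | some b =>
        by_cases h2 : (decide (x.2.2 > b.2.2) || (decide (x.2.2 = b.2.2) && decide (x.2.1 < b.2.1))) = true
        · rw [show buyB_best oid (some b) (x :: rest)
              = buyB_best oid (some x) rest by simp [buyB_best, h1, h2]]
          rw [ih]
          simp only [checkOpt, List.all_cons, h1, decide_eq_false h1, Bool.false_or]
          cases hx : G t p x
          · simp
          · simp [G_trans_better t p x b h2 hx]
        · rw [show buyB_best oid (some b) (x :: rest)
              = buyB_best oid (some b) rest by simp [buyB_best, h1, h2]]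
          rw [ih]
          simp only [checkOpt, List.all_cons, h1, decide_eq_false h1, Bool.false_or]
          cases hb : G t p b
          · simp
          · simp [G_trans_worse t p x b h2 hb]

-- ===== VERDICT (by name: the statement is the Claim_ definition above) =====
theorem buyPriorityRule_spec : Claim_equal_buyPriorityRule := by
  intro buy book _
  unfold Spec_buyPriorityRule buyPriorityRule buyPriorityRule_alt
  have h := buyB_best_check buy.1 buy.2.1 buy.2.2 book none
  simp only [checkOpt, Bool.true_and] at h
  rw [buyA_loop_all]
  match hb : buyB_best buy.1 none book with
  | none => rw [hb] at h; simpa using h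
  | some b => rw [hb] at h; simp only [G] at h; exact h.symm
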